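-- pv_equiv track=rewrite | github.com/uclanlp/ParaBART | utils.py | deleaf
-- ===== SOURCE A (Python) =====
-- def is_paren(tok):
--     return tok == ")" or tok == "("
--
-- def deleaf(tree):
--     nonleaves = ''
--     for w in tree.replace('\n', '').split():
--         w = w.replace('(', '( ').replace(')', ' )')
--         nonleaves += w + ' '
--
--     arr = nonleaves.split()
--     for n, i in enumerate(arr):
--         if n + 1 < len(arr):
--             tok1 = arr[n]
--             tok2 = arr[n + 1]
--             if not is_paren(tok1) and not is_paren(tok2):
--                 arr[n + 1] = ""
--
--     nonleaves = " ".join(arr)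
--     return nonleaves.split()
-- ===== SOURCE B (Python) =====
-- def deleaf(tree):
--     out = []
--     prev_nonparen = False
--     for w in tree.replace('\n', '').split():
--         for tok in w.replace('(', '( ').replace(')', ' )').split():
--             if tok == '(' or tok == ')':
--                 out.append(tok)
--                 prev_nonparen = False
--             elif not prev_nonparen:
--                 out.append(tok)
--                 prev_nonparen = True
--     return out
-- ===== Notes on version B (the rewrite author's own statement) =====
-- stated objective: simpler
-- what changed: B keeps A's tokenization but replaces A's three extra passes (building one big space-joined string, an index loop that blanks arr[n+1] in place, then join+re-split to drop the blanks) with a single streaming pass over the tokens maintaining a prev_nonparen flag that keeps only the first token of each non-paren run.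
import Mathlib
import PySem

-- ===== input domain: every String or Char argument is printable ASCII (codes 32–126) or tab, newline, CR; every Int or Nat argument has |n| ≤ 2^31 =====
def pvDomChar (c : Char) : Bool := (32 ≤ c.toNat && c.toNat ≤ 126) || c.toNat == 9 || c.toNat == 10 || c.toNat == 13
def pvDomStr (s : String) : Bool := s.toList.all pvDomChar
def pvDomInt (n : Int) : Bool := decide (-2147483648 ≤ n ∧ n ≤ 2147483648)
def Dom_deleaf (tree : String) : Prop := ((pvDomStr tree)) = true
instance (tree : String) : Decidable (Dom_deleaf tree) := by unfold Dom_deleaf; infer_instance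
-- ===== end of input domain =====

-- B keeps A's tokenization but replaces A's in-place blanking index loop plus join/re-split
-- with a single streaming pass keeping the first token of each non-paren run (simpler).

-- ===== PORT A =====
def isParen (tok : String) : Bool := tok == ")" || tok == "("

def deleaf (tree : String) : List String :=
  let nonleaves : String :=
    (PySem.Str.split₀ (PySem.Str.replace tree "\n" "")).foldl
      (fun nl w =>
        nl ++ (PySem.Str.replace (PySem.Str.replace w "(" "( ") ")" " )") ++ " ") ""
  let arr := PySem.Str.split₀ nonleaves
  let arr2 :=
    (List.range arr.length).foldl
      (fun (a : List String) (n : Nat) =>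
        if n + 1 < a.length then
          if !isParen (PySem.List.pyGetD a (n : Int) "") && !isParen (PySem.List.pyGetD a ((n : Int) + 1) "")
          then a.set (n + 1) "" else a
        else a)
      arr
  PySem.Str.split₀ (PySem.Str.join " " arr2)

-- ===== PORT B =====
def deleaf_alt (tree : String) : List String :=
  ((PySem.Str.split₀ (PySem.Str.replace tree "\n" "")).foldl
      (fun st w =>
        (PySem.Str.split₀ (PySem.Str.replace (PySem.Str.replace w "(" "( ") ")" " )")).foldl
          (fun st tok =>
            if tok == "(" || tok == ")" then (st.1 ++ [tok], false)
            else if !st.2 then (st.1 ++ [tok], true)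
            else (st.1, true))
          st)
      (([] : List String), false)).1

-- ===== PRECONDITION & SPEC =====
def Spec_deleaf (tree : String) (out : List String) : Prop := out = deleaf_alt tree
instance (tree : String) (out : List String) : Decidable (Spec_deleaf tree out) := by unfold Spec_deleaf; infer_instance

-- ===== CLAIM (what is proved, stated in full; the proofs are below) =====
def Claim_equal_deleaf : Prop := ∀ (tree : String), Dom_deleaf tree → Spec_deleaf tree (deleaf tree)

-- ===== LEMMAS AND PROOFS =====

-- proof-side names for the pieces the ports compute
def replTok (w : String) : List String :=
  PySem.Str.split₀ (PySem.Str.replace (PySem.Str.replace w "(" "( ") ")" " )")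

def wordsOf (tree : String) : List String :=
  PySem.Str.split₀ (PySem.Str.replace tree "\n" "")

def stepA (a : List String) (n : Nat) : List String :=
  if n + 1 < a.length then
    if !isParen (PySem.List.pyGetD a (n : Int) "") && !isParen (PySem.List.pyGetD a ((n : Int) + 1) "")
    then a.set (n + 1) "" else a
  else a

def stepB (st : List String × Bool) (tok : String) : List String × Bool :=
  if tok == "(" || tok == ")" then (st.1 ++ [tok], false)
  else if !st.2 then (st.1 ++ [tok], true)
  else (st.1, true)

def nonleavesOf (tree : String) : String :=
  (wordsOf tree).foldl
    (fun nl w => nl ++ (PySem.Str.replace (PySem.Str.replace w "(" "( ") ")" " )") ++ " ") ""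

def arrOf (tree : String) : List String := PySem.Str.split₀ (nonleavesOf tree)

theorem deleaf_eq (tree : String) :
    deleaf tree =
      PySem.Str.split₀ (PySem.Str.join " "
        ((List.range (arrOf tree).length).foldl stepA (arrOf tree))) := by
  simp only [deleaf, arrOf, nonleavesOf, wordsOf]
  rfl

theorem deleaf_alt_eq (tree : String) :
    deleaf_alt tree =
      ((wordsOf tree).foldl (fun st w => (replTok w).foldl stepB st) ([], false)).1 := by
  simp only [deleaf_alt, wordsOf, replTok]
  rfl

-- the sequential blanking pass A's index loop performs, written structurally
def blank : Bool → List String → List String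
  | _, [] => []
  | prev, t :: ts =>
      let t' := if prev && !isParen t then "" else t
      t' :: blank (!isParen t') ts

-- ---- facts about PySem.Chars.split₀ ----

theorem go_acc (s : List Char) : ∀ (cur : List Char) (acc : List (List Char)),
    PySem.Chars.split₀.go s cur acc = acc.reverse ++ PySem.Chars.split₀.go s cur [] := by
  induction s with
  | nil =>
    intro cur acc
    simp only [PySem.Chars.split₀.go]
    by_cases h : cur.isEmpty <;> simp [h]
  | cons c rest ih =>
    intro cur acc
    simp only [PySem.Chars.split₀.go]
    by_cases hs : PySem.Chars.isspace c
    · by_cases h : cur.isEmpty <;>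
        simp [hs, h, ih [] acc, ih [] (cur.reverse :: acc), ih [] [cur.reverse]]
    · simp [hs, ih (c :: cur) acc]

theorem go_space_split (a : List Char) : ∀ (b cur : List Char) (acc : List (List Char)),
    PySem.Chars.split₀.go (a ++ ' ' :: b) cur acc
      = PySem.Chars.split₀.go b [] (PySem.Chars.split₀.go a cur acc).reverse := by
  induction a with
  | nil =>
    intro b cur acc
    simp only [List.nil_append, PySem.Chars.split₀.go]
    have : PySem.Chars.isspace ' ' = true := by decide
    by_cases h : cur.isEmpty <;> simp [this, h]
  | cons c rest ih =>
    intro b cur acc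
    simp only [List.cons_append, PySem.Chars.split₀.go]
    by_cases hs : PySem.Chars.isspace c
    · by_cases h : cur.isEmpty <;> simp [hs, h, ih]
    · simp [hs, ih]

theorem split₀_append_space (a b : List Char) :
    PySem.Chars.split₀ (a ++ ' ' :: b) = PySem.Chars.split₀ a ++ PySem.Chars.split₀ b := by
  simp only [PySem.Chars.split₀, go_space_split, go_acc b [] (PySem.Chars.split₀.go a [] []).reverse]
  simp

theorem go_mem (s : List Char) : ∀ (cur : List Char) (acc : List (List Char)),
    (∀ w ∈ acc, w ≠ [] ∧ ∀ c ∈ w, PySem.Chars.isspace c = false) →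
    (∀ c ∈ cur, PySem.Chars.isspace c = false) →
    ∀ w ∈ PySem.Chars.split₀.go s cur acc, w ≠ [] ∧ ∀ c ∈ w, PySem.Chars.isspace c = false := by
  induction s with
  | nil =>
    intro cur acc hacc hcur
    simp only [PySem.Chars.split₀.go]
    cases h : cur.isEmpty
    · simp only [Bool.false_eq_true, if_neg, not_false_iff]
      intro w hw
      simp only [List.mem_reverse, List.mem_cons] at hw
      rcases hw with hw | hw
      · subst hw
        refine ⟨by simp [List.isEmpty_eq_false_iff] at h; simpa using h, ?_⟩
        intro c hc; exact hcur c (by simpa using hc)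
      · exact hacc w hw
    · simpa [h] using fun w hw => hacc w hw
  | cons c rest ih =>
    intro cur acc hacc hcur
    simp only [PySem.Chars.split₀.go]
    cases hs : PySem.Chars.isspace c
    case cons.false =>
      simp only [Bool.false_eq_true, if_neg, not_false_iff]
      refine ih (c :: cur) acc hacc ?_
      intro d hd
      rcases List.mem_cons.mp hd with hd | hd
      · subst hd; simpa using hs
      · exact hcur d hd
    case cons.true =>
      cases h : cur.isEmpty
      · simp only [Bool.false_eq_true, if_neg, not_false_iff, if_pos]
        refine ih [] _ ?_ (by simp)
        intro w hw
        rcases List.mem_cons.mp hw with hw | hw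
        · subst hw
          refine ⟨by simp [List.isEmpty_eq_false_iff] at h; simpa using h, ?_⟩
          intro d hd; exact hcur d (by simpa using hd)
        · exact hacc w hw
      · simp only [if_pos]
        exact ih [] acc hacc (by simp)

theorem split₀_mem (s : List Char) :
    ∀ w ∈ PySem.Chars.split₀ s, w ≠ [] ∧ ∀ c ∈ w, PySem.Chars.isspace c = false :=
  go_mem s [] [] (by simp) (by simp)

theorem go_nospace (w : List Char) : ∀ (cur : List Char) (acc : List (List Char)),
    (∀ c ∈ w, PySem.Chars.isspace c = false) →
    PySem.Chars.split₀.go w cur acc = PySem.Chars.split₀.go [] (w.reverse ++ cur) acc := by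
  induction w with
  | nil => intro cur acc _; simp
  | cons c rest ih =>
    intro cur acc h
    have hc : PySem.Chars.isspace c = false := h c (by simp)
    simp only [PySem.Chars.split₀.go, hc, Bool.false_eq_true, if_neg, not_false_iff]
    rw [ih (c :: cur) acc (fun d hd => h d (by simp [hd]))]
    simp only [List.reverse_cons, List.append_assoc, List.singleton_append]
    simp [PySem.Chars.split₀.go]

theorem split₀_nospace (w : List Char) (h : ∀ c ∈ w, PySem.Chars.isspace c = false) :
    PySem.Chars.split₀ w = if w = [] then [] else [w] := by
  simp only [PySem.Chars.split₀, go_nospace w [] [] h]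
  simp only [PySem.Chars.split₀.go]
  rcases eq_or_ne w [] with hw | hw
  · simp [hw]
  · simp [hw, List.isEmpty_iff]

theorem split₀_intercalate (l : List (List Char))
    (h : ∀ w ∈ l, ∀ c ∈ w, PySem.Chars.isspace c = false) :
    PySem.Chars.split₀ ([' '].intercalate l) = l.filter (· ≠ []) := by
  induction l with
  | nil => simp [List.intercalate, PySem.Chars.split₀, PySem.Chars.split₀.go]
  | cons w rest ih =>
    cases rest with
    | nil =>
      have := split₀_nospace w (h w (by simp))
      rcases eq_or_ne w [] with hw | hw <;> simp_all [List.intercalate]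
    | cons x t =>
      have hstep : [' '].intercalate (w :: x :: t) = w ++ ' ' :: [' '].intercalate (x :: t) := by
        simp [List.intercalate]
      rw [hstep, split₀_append_space, split₀_nospace w (h w (by simp)),
        ih (fun u hu => h u (by simp [hu]))]
      rcases eq_or_ne w [] with hw | hw <;> simp [hw, List.filter]

-- ---- String-level consequences ----

theorem str_split₀_mem (s : String) :
    ∀ w ∈ PySem.Str.split₀ s, w ≠ "" ∧ ∀ c ∈ w.toList, PySem.Chars.isspace c = false := by
  intro w hw
  have hm : w.toList ∈ PySem.Chars.split₀ s.toList := by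
    rw [← PySem.Str.split₀_map_toList]
    exact List.mem_map_of_mem hw
  obtain ⟨h1, h2⟩ := split₀_mem s.toList w.toList hm
  refine ⟨?_, h2⟩
  intro he; subst he; simp at h1

theorem str_split₀_join (arr : List String)
    (h : ∀ w ∈ arr, ∀ c ∈ w.toList, PySem.Chars.isspace c = false) :
    PySem.Str.split₀ (PySem.Str.join " " arr) = arr.filter (· ≠ "") := by
  have hmap : List.map String.toList (PySem.Str.split₀ (PySem.Str.join " " arr))
      = List.map String.toList (arr.filter (· ≠ "")) := by
    rw [PySem.Str.split₀_map_toList, PySem.Str.toList_join]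
    have hsep : (" " : String).toList = [' '] := rfl
    rw [hsep]
    rw [show PySem.Chars.join [' '] (List.map String.toList arr)
        = [' '].intercalate (List.map String.toList arr) from rfl]
    rw [split₀_intercalate _ (by intro w hw; obtain ⟨v, hv, rfl⟩ := List.mem_map.mp hw; exact h v hv)]
    induction arr with
    | nil => simp
    | cons a t iht =>
      simp only [List.map_cons, List.filter_cons]
      have hiff : (a.toList ≠ []) ↔ (a ≠ "") := by
        constructor
        · intro hne he; subst he; simp at hne
        · intro hne he; exact hne (String.toList_inj.mp (by simpa using he))
      by_cases hae : a = ""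
      · subst hae
        simpa using iht (fun w hw => h w (by simp [hw]))
      · have hta : a.toList ≠ [] := hiff.mpr hae
        rw [if_pos (by simpa using hta), if_pos (by simpa using hae), List.map_cons,
          iht (fun w hw => h w (by simp [hw]))]
  exact List.map_injective_iff.mpr (fun a b hab => String.toList_inj.mp hab) hmap

theorem split₀_trailing (acc X : List Char)
    (h : acc = [] ∨ ∃ cs, acc = cs ++ [' ']) :
    PySem.Chars.split₀ (acc ++ X ++ [' ']) = PySem.Chars.split₀ acc ++ PySem.Chars.split₀ X := by
  have hX : PySem.Chars.split₀ (X ++ [' ']) = PySem.Chars.split₀ X := by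
    have := split₀_append_space X []
    simpa [show PySem.Chars.split₀ [] = [] from rfl] using this
  rcases h with rfl | ⟨cs, rfl⟩
  · simpa [show PySem.Chars.split₀ [] = [] from rfl] using hX
  · have h1 : cs ++ [' '] ++ X ++ [' '] = cs ++ ' ' :: (X ++ [' ']) := by simp
    have h2 : PySem.Chars.split₀ (cs ++ [' ']) = PySem.Chars.split₀ cs := by
      have := split₀_append_space cs []
      simpa [show PySem.Chars.split₀ [] = [] from rfl] using this
    rw [h1, split₀_append_space, hX, h2]

theorem foldl_words (ws : List String) : ∀ (acc : String),
    (acc.toList = [] ∨ ∃ cs, acc.toList = cs ++ [' ']) →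
    PySem.Chars.split₀ ((ws.foldl
        (fun nl w => nl ++ (PySem.Str.replace (PySem.Str.replace w "(" "( ") ")" " )") ++ " ") acc).toList)
      = PySem.Chars.split₀ acc.toList
        ++ ws.flatMap (fun w => PySem.Chars.split₀ (PySem.Str.replace (PySem.Str.replace w "(" "( ") ")" " )").toList) := by
  induction ws with
  | nil => intro acc _; simp
  | cons w t ih =>
    intro acc hacc
    simp only [List.foldl_cons, List.flatMap_cons]
    rw [ih _ (by
      right
      refine ⟨(acc ++ PySem.Str.replace (PySem.Str.replace w "(" "( ") ")" " )").toList, ?_⟩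
      simp [String.toList_append])]
    have : (acc ++ PySem.Str.replace (PySem.Str.replace w "(" "( ") ")" " )" ++ " ").toList
        = acc.toList ++ (PySem.Str.replace (PySem.Str.replace w "(" "( ") ")" " )").toList ++ [' '] := by
      simp [String.toList_append]
    rw [this, split₀_trailing _ _ hacc, List.append_assoc]

theorem arrOf_eq (tree : String) : arrOf tree = (wordsOf tree).flatMap replTok := by
  have hmap : List.map String.toList (arrOf tree)
      = List.map String.toList ((wordsOf tree).flatMap replTok) := by
    have h0 : ("" : String).toList = [] := rfl
    have h1 : List.map String.toList (arrOf tree)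
        = (wordsOf tree).flatMap
            (fun w => PySem.Chars.split₀ (PySem.Str.replace (PySem.Str.replace w "(" "( ") ")" " )").toList) := by
      unfold arrOf nonleavesOf
      rw [PySem.Str.split₀_map_toList, foldl_words _ "" (Or.inl h0)]
      rw [h0, show PySem.Chars.split₀ [] = [] from rfl, List.nil_append]
    rw [h1, List.map_flatMap]
    simp only [replTok, PySem.Str.split₀_map_toList]
  exact List.map_injective_iff.mpr (fun a b hab => String.toList_inj.mp hab) hmap

-- ---- A's index loop is the structural blanking pass ----

theorem loop_inv (suf : List String) : ∀ (pre : List String) (h : pre ≠ []),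
    (List.range' (pre.length - 1) (suf.length + 1)).foldl stepA (pre ++ suf)
      = pre ++ blank (!isParen (pre.getLast h)) suf := by
  induction suf with
  | nil =>
    intro pre h
    have hpos := List.length_pos_of_ne_nil h
    simp only [List.length_nil, Nat.zero_add, List.range'_one, List.foldl_cons, List.foldl_nil]
    unfold stepA
    rw [if_neg (by simp; omega)]
    simp [blank]
  | cons t ts ih =>
    intro pre h
    have hlen : pre.length - 1 + 1 = pre.length := by
      have := List.length_pos_of_ne_nil h
      omega
    rw [List.range'_succ, List.foldl_cons]
    have hguard : pre.length - 1 + 1 < (pre ++ t :: ts).length := by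
      simp [hlen]
    have hpos := List.length_pos_of_ne_nil h
    have hget1 : PySem.List.pyGetD (pre ++ t :: ts) ((pre.length - 1 : Nat) : Int) "" = pre.getLast h := by
      rw [PySem.List.pyGetD_natCast]
      rw [List.getD_eq_getElem?_getD, List.getElem?_append_left (by omega)]
      rw [List.getLast_eq_getElem]
      rw [List.getElem?_eq_getElem (by omega)]
      rfl
    have hget2 : PySem.List.pyGetD (pre ++ t :: ts) (((pre.length - 1 : Nat) : Int) + 1) "" = t := by
      have hc : ((pre.length - 1 : Nat) : Int) + 1 = ((pre.length : Nat) : Int) := by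
        omega
      rw [hc, PySem.List.pyGetD_natCast]
      rw [List.getD_eq_getElem?_getD, List.getElem?_append_right (by omega)]
      simp
    have hset : (pre ++ t :: ts).set pre.length ""
        = (pre ++ [("" : String)]) ++ ts := by
      rw [List.set_append_right _ _ (by omega)]
      simp
    have hstep : stepA (pre ++ t :: ts) (pre.length - 1)
        = pre ++ (if !isParen (pre.getLast h) && !isParen t then "" else t) :: ts := by
      unfold stepA
      rw [if_pos hguard, hget1, hget2]
      by_cases hb : !isParen (pre.getLast h) && !isParen t
      · rw [if_pos hb, if_pos hb]
        rw [show pre.length - 1 + 1 = pre.length from hlen, hset]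
        simp
      · rw [if_neg hb, if_neg hb]
    rw [hstep]
    set t' := if !isParen (pre.getLast h) && !isParen t then "" else t with ht'
    have hpre' : pre ++ [t'] ≠ [] := by simp
    have hcall := ih (pre ++ [t']) hpre'
    have hlen2 : (pre ++ [t']).length - 1 = pre.length - 1 + 1 := by
      simp [hlen]
    have hlast : (pre ++ [t']).getLast hpre' = t' := by simp
    rw [show pre ++ t' :: ts = (pre ++ [t']) ++ ts by simp] at *
    rw [hlen2] at hcall
    simp only [List.length_cons]
    rw [hcall, hlast]
    have hblank : blank (!isParen (pre.getLast h)) (t :: ts) = t' :: blank (!isParen t') ts := by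
      conv_lhs => rw [blank]
    rw [hblank]
    simp

theorem loopA_eq_blank (arr : List String) :
    (List.range arr.length).foldl stepA arr = blank false arr := by
  cases arr with
  | nil => simp [blank]
  | cons a rest =>
    have key := loop_inv rest [a] (by simp)
    simp only [List.length_cons, List.length_nil, Nat.zero_add, Nat.sub_self,
      List.getLast_singleton, List.singleton_append] at key
    have hb : blank false (a :: rest) = a :: blank (!isParen a) rest := by
      rw [blank]; simp
    rw [List.range_eq_range', hb]
    simp only [List.length_cons]
    simpa using key

theorem blank_mem (ts : List String) : ∀ (prev : Bool), ∀ w ∈ blank prev ts, w = "" ∨ w ∈ ts := by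
  induction ts with
  | nil => intro prev w hw; simp [blank] at hw
  | cons t rest ih =>
    intro prev w hw
    rw [blank] at hw
    rcases List.mem_cons.mp hw with hw | hw
    · by_cases hb : prev && !isParen t
      · left; simp [hb] at hw; exact hw
      · right; simp [hb] at hw; simp [hw]
    · rcases ih _ w hw with h | h
      · exact Or.inl h
      · exact Or.inr (by simp [h])

-- ---- B's flag pass computes the filtered blanking pass ----

theorem foldB_eq (ts : List String) : ∀ (out : List String) (prev : Bool),
    (∀ t ∈ ts, t ≠ "") →
    (ts.foldl stepB (out, prev)).1 = out ++ (blank prev ts).filter (· ≠ "") := by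
  induction ts with
  | nil => intro out prev _; simp [blank]
  | cons t rest ih =>
    intro out prev h
    have hne : t ≠ "" := h t (by simp)
    rw [List.foldl_cons, blank]
    by_cases hp : isParen t
    · have hb : (prev && !isParen t) = false := by simp [hp]
      have hB : stepB (out, prev) t = (out ++ [t], false) := by
        unfold isParen at hp
        rcases Bool.or_eq_true _ _ |>.mp hp with h' | h' <;> simp [stepB, h']
      rw [hB, ih _ _ (fun u hu => h u (by simp [hu]))]
      simp only [hb, Bool.false_eq_true, if_neg, not_false_iff]
      rw [List.filter_cons, if_pos (by simpa using hne)]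
      have : (!isParen t) = false := by simp [hp]
      rw [this]
      simp
    · have hip : isParen t = false := by simpa using hp
      cases prev with
      | false =>
        have hB : stepB (out, false) t = (out ++ [t], true) := by
          unfold isParen at hip
          simp at hip
          simp [stepB, hip]
        rw [hB, ih _ _ (fun u hu => h u (by simp [hu]))]
        simp only [Bool.false_and, Bool.false_eq_true, if_neg, not_false_iff]
        rw [List.filter_cons, if_pos (by simpa using hne)]
        simp [hip]
      | true =>
        have hB : stepB (out, true) t = (out, true) := by
          unfold isParen at hip
          simp at hip
          simp [stepB, hip]
        rw [hB, ih _ _ (fun u hu => h u (by simp [hu]))]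
        have hcond : (true && !isParen t) = true := by simp [hip]
        rw [hcond]
        simp only [if_pos]
        rw [List.filter_cons, if_neg (by simp)]
        have : (!isParen ("" : String)) = true := by decide
        rw [this]

theorem foldB_words (ws : List String) : ∀ (st : List String × Bool),
    (ws.foldl (fun st w => (replTok w).foldl stepB st) st) = (ws.flatMap replTok).foldl stepB st := by
  induction ws with
  | nil => intro st; simp
  | cons w t ih => intro st; simp [List.foldl_append, ih]

-- ===== VERDICT (by name: the statement is the Claim_ definition above) =====
theorem deleaf_spec : Claim_equal_deleaf := by
  intro tree _
  unfold Spec_deleaf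
  rw [deleaf_eq, deleaf_alt_eq]
  rw [loopA_eq_blank]
  rw [str_split₀_join _ (by
    intro w hw
    rcases blank_mem _ _ w hw with rfl | hmem
    · intro c hc; simp at hc
    · exact (str_split₀_mem _ w hmem).2)]
  rw [foldB_words, ← arrOf_eq]
  have hts : ∀ t ∈ arrOf tree, t ≠ "" :=
    fun t ht => (str_split₀_mem (nonleavesOf tree) t ht).1
  rw [foldB_eq _ [] false hts]
  simp
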